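-- pv_equiv track=rewrite | github.com/mansujiaosheng/BeaconFlow | beaconflow/analysis/value_trace.py | _infer_branch_result
-- ===== SOURCE A (Python) =====
-- def _infer_branch_result(
--     block_addr: int,
--     block_end: int,
--     succs: tuple[int, ...],
--     jcc_target_str: str | None,
--     executed_addrs: set[int] | None,
-- ) -> str | None:
--     if executed_addrs is None:
--         return None
--     if not succs:
--         return None
--     taken_addr = None
--     fallthrough_addr = block_end
--     if jcc_target_str:
--         try:
--             taken_addr = int(jcc_target_str, 16)
--         except ValueError:
--             pass
--     for succ in succs:
--         if succ in executed_addrs: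
--             if taken_addr is not None and succ == taken_addr:
--                 return "taken"
--             if succ == fallthrough_addr:
--                 return "fallthrough"
--     for succ in succs:
--         if succ in executed_addrs:
--             return "taken" if succ != fallthrough_addr else "fallthrough"
--     return "not_executed"
-- ===== SOURCE B (Python) =====
-- def _infer_branch_result(
--     block_addr: int,
--     block_end: int,
--     succs: tuple[int, ...],
--     jcc_target_str: str | None,
--     executed_addrs: set[int] | None,
-- ) -> str | None:
--     if executed_addrs is None:
--         return None
--     if not succs:
--         return None
--     taken_addr = None
--     fallthrough_addr = block_end
--     if jcc_target_str:
--         try: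
--             taken_addr = int(jcc_target_str, 16)
--         except ValueError:
--             pass
--     first_executed = None
--     for succ in succs:
--         if succ in executed_addrs:
--             if taken_addr is not None and succ == taken_addr:
--                 return "taken"
--             if succ == fallthrough_addr:
--                 return "fallthrough"
--             if first_executed is None:
--                 first_executed = succ
--     if first_executed is not None:
--         return "taken" if first_executed != fallthrough_addr else "fallthrough"
--     return "not_executed"
-- ===== Notes on version B (the rewrite author's own statement) =====
-- stated objective: simpler
-- what changed: Replaced A's two sequential scans over succs with a single pass that returns on the first precise taken/fallthrough match and otherwise tracks the first executed successor as the fallback.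
import Mathlib
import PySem

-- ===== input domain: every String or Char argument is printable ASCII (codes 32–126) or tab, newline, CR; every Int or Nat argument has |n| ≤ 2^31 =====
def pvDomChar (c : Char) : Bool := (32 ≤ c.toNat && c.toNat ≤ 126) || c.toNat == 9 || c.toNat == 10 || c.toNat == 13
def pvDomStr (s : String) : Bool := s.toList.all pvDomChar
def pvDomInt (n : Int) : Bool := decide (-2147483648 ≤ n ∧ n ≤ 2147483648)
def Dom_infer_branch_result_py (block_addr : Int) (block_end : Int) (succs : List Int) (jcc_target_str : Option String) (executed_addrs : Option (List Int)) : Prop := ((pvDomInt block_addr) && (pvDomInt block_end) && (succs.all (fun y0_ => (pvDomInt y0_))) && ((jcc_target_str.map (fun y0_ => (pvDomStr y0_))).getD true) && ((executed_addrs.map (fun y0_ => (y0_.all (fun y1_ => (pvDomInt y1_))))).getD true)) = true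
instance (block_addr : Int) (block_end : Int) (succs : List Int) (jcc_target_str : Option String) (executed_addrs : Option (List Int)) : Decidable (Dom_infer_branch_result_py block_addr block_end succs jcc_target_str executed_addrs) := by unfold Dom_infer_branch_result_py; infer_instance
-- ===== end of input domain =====

-- ===== PORT A =====
-- B is a single pass over succs instead of A's two sequential scans; same return value everywhere.
-- first scan of A: first executed succ that equals taken_addr (checked first) or fallthrough
def aLoop1 (ex : List Int) (taken : Option Int) (ft : Int) : List Int → Option String
  | [] => none
  | s :: rest =>
    if ex.contains s then
      if taken = some s then some "taken"
      else if s = ft then some "fallthrough"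
      else aLoop1 ex taken ft rest
    else aLoop1 ex taken ft rest

-- second scan of A: classify the first executed succ
def aLoop2 (ex : List Int) (ft : Int) : List Int → Option String
  | [] => none
  | s :: rest =>
    if ex.contains s then some (if s ≠ ft then "taken" else "fallthrough")
    else aLoop2 ex ft rest

def infer_branch_result_py (block_addr : Int) (block_end : Int) (succs : List Int) (jcc_target_str : Option String) (executed_addrs : Option (List Int)) : Option String :=
  match executed_addrs with
  | none => none
  | some ex =>
    if succs = [] then none
    else
      let taken : Option Int :=
        match jcc_target_str with
        | some s => if s ≠ "" then PySem.Int.ofStrBase? s 16 else none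
        | none => none
      let ft := block_end
      match aLoop1 ex taken ft succs with
      | some r => some r
      | none =>
        match aLoop2 ex ft succs with
        | some r => some r
        | none => some "not_executed"

-- ===== PORT B =====
-- single pass: immediate return on a precise match, `first` carries the first executed succ
def bLoop (ex : List Int) (taken : Option Int) (ft : Int) : List Int → Option Int → String
  | [], first =>
    match first with
    | some f => if f ≠ ft then "taken" else "fallthrough"
    | none => "not_executed"
  | s :: rest, first =>
    if ex.contains s then
      if taken = some s then "taken"
      else if s = ft then "fallthrough"
      else bLoop ex taken ft rest (match first with | some f => some f | none => some s)
    else bLoop ex taken ft rest first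

def infer_branch_result_py_alt (block_addr : Int) (block_end : Int) (succs : List Int) (jcc_target_str : Option String) (executed_addrs : Option (List Int)) : Option String :=
  match executed_addrs with
  | none => none
  | some ex =>
    if succs = [] then none
    else
      let taken : Option Int :=
        match jcc_target_str with
        | some s => if s ≠ "" then PySem.Int.ofStrBase? s 16 else none
        | none => none
      some (bLoop ex taken block_end succs none)

-- ===== PRECONDITION & SPEC =====
def Spec_infer_branch_result_py (block_addr : Int) (block_end : Int) (succs : List Int) (jcc_target_str : Option String) (executed_addrs : Option (List Int)) (out : Option String) : Prop := out = infer_branch_result_py_alt block_addr block_end succs jcc_target_str executed_addrs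
instance (block_addr : Int) (block_end : Int) (succs : List Int) (jcc_target_str : Option String) (executed_addrs : Option (List Int)) (out : Option String) : Decidable (Spec_infer_branch_result_py block_addr block_end succs jcc_target_str executed_addrs out) := by unfold Spec_infer_branch_result_py; infer_instance

-- ===== CLAIM (what is proved, stated in full; the proofs are below) =====
def Claim_equal_infer_branch_result_py : Prop := ∀ (block_addr : Int) (block_end : Int) (succs : List Int) (jcc_target_str : Option String) (executed_addrs : Option (List Int)), Dom_infer_branch_result_py block_addr block_end succs jcc_target_str executed_addrs → Spec_infer_branch_result_py block_addr block_end succs jcc_target_str executed_addrs (infer_branch_result_py block_addr block_end succs jcc_target_str executed_addrs)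

-- ===== LEMMAS AND PROOFS =====

-- ===== VERDICT (by name: the statement is the Claim_ definition above) =====
-- B's single pass, with accumulator `first`, computes A's two-scan result.
theorem bLoop_eq (ex : List Int) (taken : Option Int) (ft : Int) :
    ∀ (l : List Int) (first : Option Int),
      bLoop ex taken ft l first =
        match aLoop1 ex taken ft l with
        | some r => r
        | none =>
          match first with
          | some f => if f ≠ ft then "taken" else "fallthrough"
          | none =>
            match aLoop2 ex ft l with
            | some r => r
            | none => "not_executed" := by
  intro l
  induction l with
  | nil => intro first; simp [bLoop, aLoop1, aLoop2]
  | cons s rest ih =>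
    intro first
    simp only [bLoop, aLoop1, aLoop2]
    by_cases hc : ex.contains s = true
    · simp only [hc, if_true]
      by_cases ht : taken = some s
      · simp [ht]
      · simp only [ht, if_false]
        by_cases hf : s = ft
        · simp [hf]
        · simp only [hf]
          rw [ih]
          cases first with
          | some f => simp
          | none =>
            simp only []
            cases h1 : aLoop1 ex taken ft rest <;> simp [hf]
    · simp only [Bool.not_eq_true] at hc
      simp only [hc]
      exact ih first

theorem infer_branch_result_py_spec : Claim_equal_infer_branch_result_py := by
  intro block_addr block_end succs jcc_target_str executed_addrs _
  unfold Spec_infer_branch_result_py infer_branch_result_py infer_branch_result_py_alt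
  cases executed_addrs with
  | none => rfl
  | some ex =>
    by_cases hs : succs = []
    · simp [hs]
    · simp only [hs]
      rw [bLoop_eq]
      cases h1 : aLoop1 ex _ block_end succs with
      | some r => simp
      | none =>
        cases h2 : aLoop2 ex block_end succs <;> simp
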